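-- pv_equiv track=rewrite | github.com/mohos26/Challenges | Python/Hard/Infection of the Ones.py | ones_infection
-- ===== SOURCE A (Python) =====
-- def get_indices(lst, el, row):
-- 	res = []
-- 	while el in lst:
-- 		aid = lst.index(el)
-- 		res.append([aid // row, aid % row])
-- 		lst[lst.index(el)] = 0
-- 	return res
--
-- def ones_infection(arr):
-- 	column = len(arr)
-- 	row = len(arr[0])
-- 	lst = []
-- 	for arg in arr:
-- 		lst += arg
-- 	for arg in get_indices(lst, 1, row):
-- 		for i in range(row):
-- 			arr[arg[0]][i] = 1
-- 		for i in range(column):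
-- 			arr[i][arg[1]] = 1
-- 	return arr
-- ===== SOURCE B (Python) =====
-- def ones_infection(arr):
--     rows = {i for i, r in enumerate(arr) if 1 in r}
--     cols = {j for r in arr for j, v in enumerate(r) if v == 1}
--     for i, r in enumerate(arr):
--         for j in range(len(r)):
--             if i in rows or j in cols:
--                 r[j] = 1
--     return arr
-- ===== Notes on version B (the rewrite author's own statement) =====
-- stated objective: faster
-- what changed: Instead of flattening the grid and repeatedly scanning it with 'in'/list.index (zeroing found 1s) and re-writing whole rows/columns per found 1, B makes one pass to collect the set of row indices and column indices that contain a 1 and one pass to write the output.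
-- outside the precondition, e.g. on ones_infection([[0], [1, 0]]): A returns [[1], [1, 0]], B returns [[1], [1, 1]]
import Mathlib
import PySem

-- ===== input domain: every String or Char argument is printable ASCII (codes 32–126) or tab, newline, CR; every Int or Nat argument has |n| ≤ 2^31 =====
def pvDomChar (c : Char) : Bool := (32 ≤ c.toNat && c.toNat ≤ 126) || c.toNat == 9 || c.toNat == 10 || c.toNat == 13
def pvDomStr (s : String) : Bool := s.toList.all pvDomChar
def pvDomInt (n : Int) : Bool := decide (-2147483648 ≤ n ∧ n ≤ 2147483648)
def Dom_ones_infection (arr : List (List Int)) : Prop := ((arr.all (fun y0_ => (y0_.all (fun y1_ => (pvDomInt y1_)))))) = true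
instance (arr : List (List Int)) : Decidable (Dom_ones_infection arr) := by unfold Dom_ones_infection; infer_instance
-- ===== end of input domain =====

-- B replaces A's repeated 'in'/list.index scans over the flattened grid by one marking pass
-- (sets of rows/columns containing a 1) and one output pass. A mutates arr in place and returns
-- it; B performs the same in-place mutation; the equivalence proved here is about the return value.

-- ===== PORT A =====
-- while el in lst: … ; the loop zeroes one occurrence of el per iteration, so for el ≠ 0 it runs
-- exactly (lst.count el) times; fuel = lst.count el is therefore exact for el ≠ 0 (A only calls
-- get_indices with el = 1; for el = 0 Python would diverge).
def getIndicesGo (lst : List Int) (el row : Int) (res : List (List Int)) : Nat → List (List Int)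
  | 0 => res
  | fuel+1 =>
    if lst.contains el then
      let aid : Nat := (PySem.List.index? lst el).getD 0   -- lst.index(el); contains → some
      let res' := res ++ [[PySem.Int.floordiv (aid : Int) row, PySem.Int.mod (aid : Int) row]]
      getIndicesGo (lst.set aid 0) el row res' fuel        -- lst[lst.index(el)] = 0
    else res

def getIndices (lst : List Int) (el row : Int) : List (List Int) :=
  getIndicesGo lst el row [] (lst.count el)

-- arr[k][i] = 1  (all indices A produces are nonnegative and, under Pre_, in range)
def writeCell (a : List (List Int)) (k i : Int) : List (List Int) :=
  PySem.List.pySetD a k (PySem.List.pySetD (PySem.List.pyGetD a k []) i 1)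

def ones_infection (arr : List (List Int)) : List (List Int) :=
  let column : Int := arr.length
  let row : Int := (PySem.List.pyGetD arr 0 []).length     -- len(arr[0]); arr = [] raises, excluded by Pre_
  let lst := arr.foldl (fun l arg => l ++ arg) []
  (getIndices lst 1 row).foldl (fun a arg =>
    let a := (PySem.List.pyRange 0 row 1).foldl (fun a i => writeCell a (PySem.List.pyGetD arg 0 0) i) a
    (PySem.List.pyRange 0 column 1).foldl (fun a i => writeCell a i (PySem.List.pyGetD arg 1 0)) a) arr

-- ===== PORT B =====
def altRowSet (arr : List (List Int)) : PySem.Set Int :=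
  (PySem.List.enumerate arr 0).foldl
    (fun s p => if p.2.contains 1 then PySem.Set.add s p.1 else s) PySem.Set.empty

def altColSet (arr : List (List Int)) : PySem.Set Int :=
  arr.foldl (fun s r =>
    (PySem.List.enumerate r 0).foldl
      (fun s q => if q.2 = 1 then PySem.Set.add s q.1 else s) s) PySem.Set.empty

-- the in-place write loop 'for j in range(len(r)): if …: r[j] = 1' rebuilds row r pointwise
def ones_infection_alt (arr : List (List Int)) : List (List Int) :=
  let rows := altRowSet arr
  let cols := altColSet arr
  (PySem.List.enumerate arr 0).map (fun p =>
    (PySem.List.enumerate p.2 0).map (fun q =>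
      if PySem.Set.contains rows p.1 || PySem.Set.contains cols q.1 then 1 else q.2))

-- ===== PRECONDITION & SPEC =====
-- Pre_ excludes the empty grid (A raises IndexError on len(arr[0])) and ragged grids that contain
-- a 1: there A's flattened-index arithmetic, driven by the first row's width, either raises
-- IndexError or writes 1 into cells chosen by that width — an artefact of the implementation.
-- Ragged grids with no 1 are kept (both programs return arr unchanged).
def Pre_ones_infection (arr : List (List Int)) : Prop :=
  arr ≠ [] ∧ ((arr.all (fun r => r.length == (arr.headD []).length)) = true ∨
              (arr.all (fun r => !r.contains 1)) = true)
instance (arr : List (List Int)) : Decidable (Pre_ones_infection arr) := by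
  unfold Pre_ones_infection; infer_instance
def pvWitness_ones_infection : List (List Int) := [[0, 1], [0, 0]]

def Spec_ones_infection (arr : List (List Int)) (out : List (List Int)) : Prop := out = ones_infection_alt arr
instance (arr : List (List Int)) (out : List (List Int)) : Decidable (Spec_ones_infection arr out) := by unfold Spec_ones_infection; infer_instance

-- ===== CLAIM (what is proved, stated in full; the proofs are below) =====
def Claim_equal_ones_infection : Prop := ∀ (arr : List (List Int)), Dom_ones_infection arr → Pre_ones_infection arr → Spec_ones_infection arr (ones_infection arr)

-- ===== LEMMAS AND PROOFS =====

-- value of cell (p,q) of a grid, 0 outside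
def cellAt (a : List (List Int)) (p q : Nat) : Int := (a.getD p []).getD q 0
-- shape: n rows, each of length m
def Sh (a : List (List Int)) (n m : Nat) : Prop := a.length = n ∧ ∀ r ∈ a, r.length = m
-- the writes A performs for one element of get_indices, with row = m and column = n
def hitArg (arg : List Int) (p q : Nat) : Bool :=
  arg.getD 0 0 == (p : Int) || arg.getD 1 0 == (q : Int)
def writeArg (n m : Nat) (a : List (List Int)) (arg : List Int) : List (List Int) :=
  let a := (PySem.List.pyRange 0 (m : Int) 1).foldl
    (fun a i => writeCell a (PySem.List.pyGetD arg 0 0) i) a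
  (PySem.List.pyRange 0 (n : Int) 1).foldl
    (fun a i => writeCell a i (PySem.List.pyGetD arg 1 0)) a

theorem flat_foldl (arr : List (List Int)) : ∀ acc, arr.foldl (fun l a => l ++ a) acc = acc ++ arr.flatten := by
  induction arr with
  | nil => simp
  | cons r t ih => intro acc; simp [List.foldl_cons, ih]

theorem flat_len (arr : List (List Int)) (m : Nat) (h : ∀ r ∈ arr, r.length = m) :
    arr.flatten.length = arr.length * m := by
  induction arr with
  | nil => simp
  | cons r t ih =>
    simp only [List.flatten_cons, List.length_append, List.length_cons]
    rw [ih (fun r hr => h r (List.mem_cons_of_mem _ hr)), h r List.mem_cons_self]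
    ring

theorem getD_set_eq {alpha : Type} (l : List alpha) (k p : Nat) (v d : alpha) :
    (l.set k v).getD p d = if p = k ∧ k < l.length then v else l.getD p d := by
  rw [List.getD_eq_getElem?_getD, List.getD_eq_getElem?_getD, List.getElem?_set]
  by_cases h : k = p
  · subst h
    by_cases h2 : k < l.length
    · simp [h2]
    · simp [h2]
  · have h' : ¬ (p = k) := fun hh => h hh.symm
    simp [h, h']


theorem flat_get (arr : List (List Int)) (m : Nat) (h : ∀ r ∈ arr, r.length = m) :
    ∀ (i j : Nat), i < arr.length → j < m → arr.flatten[i*m+j]? = some (cellAt arr i j) := by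
  induction arr with
  | nil => intro i j hi; simp at hi
  | cons r t ih =>
    intro i j hi hj
    have hr : r.length = m := h r List.mem_cons_self
    match i with
    | 0 =>
      simp only [List.flatten_cons, Nat.zero_mul, Nat.zero_add]
      rw [List.getElem?_append_left (by omega)]
      simp [cellAt, List.getD_eq_getElem?_getD, List.getElem?_eq_getElem (by omega : j < r.length)]
    | i+1 =>
      simp only [List.flatten_cons]
      rw [List.getElem?_append_right (by rw [hr]; nlinarith)]
      have : (i+1)*m + j - r.length = i*m + j := by rw [hr]; ring_nf; omega
      rw [this, ih (fun r hr => h r (List.mem_cons_of_mem _ hr)) i j (by simpa using hi) hj]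
      simp [cellAt]

theorem go_mem (row : Int) : ∀ (c : Nat) (lst : List Int) (res : List (List Int)) (x : List Int),
    lst.count 1 = c →
    (x ∈ getIndicesGo lst 1 row res c ↔
      x ∈ res ∨ ∃ a : Nat, lst[a]? = some 1 ∧
        x = [PySem.Int.floordiv (a : Int) row, PySem.Int.mod (a : Int) row]) := by
  intro c
  induction c with
  | zero =>
    intro lst res x hc
    have hnm : (1:Int) ∉ lst := by
      intro hm; have := List.count_pos_iff.2 hm; omega
    have hcontains : lst.contains 1 = false := by
      simpa using hnm
    constructor
    · intro hx; exact Or.inl (by simpa [getIndicesGo] using hx)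
    · rintro (hx | ⟨a, ha, rfl⟩)
      · simpa [getIndicesGo] using hx
      · exact absurd (List.mem_of_getElem? ha) hnm
  | succ c ih =>
    intro lst res x hc
    have hmem : (1:Int) ∈ lst := List.count_pos_iff.1 (by omega)
    have hcontains : lst.contains 1 = true := by simpa using hmem
    obtain ⟨k, hk⟩ := Option.isSome_iff_exists.1 ((PySem.List.index?_isSome_iff lst 1).2 hmem)
    obtain ⟨hklen, hkval, hkmin⟩ := PySem.List.getElem_of_index?_eq_some hk
    have hcount : (lst.set k 0).count 1 = c := by
      rw [List.count_set hklen]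
      simp [hkval] at *
      omega
    have hk' : List.idxOf? 1 lst = some k := by
      have h2 := hk; rwa [PySem.List.index?_eq_idxOf?] at h2
    have hgo : getIndicesGo lst 1 row res (c+1) =
        getIndicesGo (lst.set k 0) 1 row
          (res ++ [[PySem.Int.floordiv (k : Int) row, PySem.Int.mod (k : Int) row]]) c := by
      simp [getIndicesGo, hmem, hk']
    rw [hgo, ih _ _ x hcount]
    constructor
    · rintro (hx | ⟨a, ha, rfl⟩)
      · rcases List.mem_append.1 hx with h | h
        · exact Or.inl h
        · refine Or.inr ⟨k, ?_, by simpa using h⟩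
          rw [List.getElem?_eq_getElem hklen, hkval]
      · by_cases hak : a = k
        · subst hak
          rw [List.getElem?_set_self hklen] at ha
          simp at ha
        · rw [List.getElem?_set_ne (fun h => hak h.symm)] at ha
          exact Or.inr ⟨a, ha, rfl⟩
    · rintro (hx | ⟨a, ha, rfl⟩)
      · exact Or.inl (List.mem_append_left _ hx)
      · by_cases hak : a = k
        · subst hak
          exact Or.inl (by simp)
        · refine Or.inr ⟨a, ?_, rfl⟩
          rw [List.getElem?_set_ne (fun h => hak h.symm)]
          exact ha

theorem writeCell_eq (a : List (List Int)) (k i : Int) (hk : 0 ≤ k) (hi : 0 ≤ i) :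
    writeCell a k i = a.set k.toNat ((a.getD k.toNat []).set i.toNat 1) := by
  simp [writeCell, PySem.List.pySetD_of_nonneg _ _ hk, PySem.List.pySetD_of_nonneg _ _ hi,
    PySem.List.pyGetD_of_nonneg _ _ hk]

theorem rowlen_getD (a : List (List Int)) (n m : Nat) (hs : Sh a n m) (p : Nat) (hp : p < n) :
    (a.getD p []).length = m := by
  obtain ⟨hlen, hrows⟩ := hs
  rw [List.getD_eq_getElem _ _ (by omega)]
  exact hrows _ (List.getElem_mem _)

theorem Sh_writeCell (a : List (List Int)) (n m : Nat) (k i : Int) (hk : 0 ≤ k) (hi : 0 ≤ i)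
    (hk2 : k.toNat < n) (hs : Sh a n m) : Sh (writeCell a k i) n m := by
  have hrl := rowlen_getD a n m hs k.toNat hk2
  obtain ⟨hlen, hrows⟩ := hs
  rw [writeCell_eq a k i hk hi]
  refine ⟨by simpa using hlen, ?_⟩
  intro r hr
  rcases List.mem_or_eq_of_mem_set hr with h | h
  · exact hrows r h
  · subst h
    simpa using hrl
theorem cell_writeCell (a : List (List Int)) (n m : Nat) (hs : Sh a n m) (k i : Int)
    (hk : 0 ≤ k) (hi : 0 ≤ i) (hk2 : k.toNat < n) (hi2 : i.toNat < m) (p q : Nat) :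
    cellAt (writeCell a k i) p q = if p = k.toNat ∧ q = i.toNat then 1 else cellAt a p q := by
  have hrl := rowlen_getD a n m hs k.toNat hk2
  have hlen := hs.1
  rw [writeCell_eq a k i hk hi]
  unfold cellAt
  rw [getD_set_eq]
  by_cases hp : p = k.toNat
  · rw [if_pos ⟨hp, by omega⟩, getD_set_eq]
    by_cases hq : q = i.toNat
    · rw [if_pos ⟨hq, by omega⟩, if_pos ⟨hp, hq⟩]
    · rw [if_neg (by tauto), if_neg (by tauto), hp]
  · rw [if_neg (by tauto), if_neg (by tauto)]

theorem fold_row (n m : Nat) (k : Int) (hk : 0 ≤ k) (hkn : k.toNat < n) :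
    ∀ (js : List Nat) (a : List (List Int)), Sh a n m → (∀ j ∈ js, j < m) →
      Sh (js.foldl (fun a (j : Nat) => writeCell a k (j : Int)) a) n m ∧
      ∀ p q, p < n → q < m →
        cellAt (js.foldl (fun a (j : Nat) => writeCell a k (j : Int)) a) p q =
          if p = k.toNat ∧ q ∈ js then 1 else cellAt a p q := by
  intro js
  induction js with
  | nil => intro a hs _; exact ⟨hs, by simp⟩
  | cons j t ih =>
    intro a hs hjs
    have hj : j < m := hjs j List.mem_cons_self
    have hs' : Sh (writeCell a k (j : Int)) n m :=
      Sh_writeCell a n m k j hk (by positivity) hkn hs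
    obtain ⟨hsh, hcell⟩ := ih (writeCell a k (j : Int)) hs'
      (fun x hx => hjs x (List.mem_cons_of_mem _ hx))
    refine ⟨by simpa [List.foldl_cons] using hsh, ?_⟩
    intro p q hp hq
    rw [List.foldl_cons, hcell p q hp hq,
      cell_writeCell a n m hs k (j : Int) hk (by positivity) hkn (by simpa using hj) p q]
    by_cases h1 : p = k.toNat
    · by_cases h2 : q ∈ t
      · simp [h1, h2]
      · by_cases h3 : q = j
        · simp [h1, h3]
        · simp [h1, h2, h3]
    · simp [h1]

theorem fold_col (n m : Nat) (j : Int) (hj : 0 ≤ j) (hjm : j.toNat < m) :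
    ∀ (is : List Nat) (a : List (List Int)), Sh a n m → (∀ i ∈ is, i < n) →
      Sh (is.foldl (fun a (i : Nat) => writeCell a (i : Int) j) a) n m ∧
      ∀ p q, p < n → q < m →
        cellAt (is.foldl (fun a (i : Nat) => writeCell a (i : Int) j) a) p q =
          if p ∈ is ∧ q = j.toNat then 1 else cellAt a p q := by
  intro is
  induction is with
  | nil => intro a hs _; exact ⟨hs, by simp⟩
  | cons i t ih =>
    intro a hs his
    have hi : i < n := his i List.mem_cons_self
    have hs' : Sh (writeCell a (i : Int) j) n m :=
      Sh_writeCell a n m (i : Int) j (by positivity) hj (by simpa using hi) hs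
    obtain ⟨hsh, hcell⟩ := ih (writeCell a (i : Int) j) hs'
      (fun x hx => his x (List.mem_cons_of_mem _ hx))
    refine ⟨by simpa [List.foldl_cons] using hsh, ?_⟩
    intro p q hp hq
    rw [List.foldl_cons, hcell p q hp hq,
      cell_writeCell a n m hs (i : Int) j (by positivity) hj (by simpa using hi) hjm p q]
    by_cases h1 : q = j.toNat
    · by_cases h2 : p ∈ t
      · simp [h1, h2]
      · by_cases h3 : p = i
        · simp [h1, h3]
        · simp [h1, h2, h3]
    · simp [h1]


theorem writeArg_cell (n m : Nat) (hm : 0 < m) (a : List (List Int)) (hs : Sh a n m)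
    (arg : List Int) (a0 : Nat) (ha0 : a0 < n * m)
    (harg : arg = [((a0 / m : Nat) : Int), ((a0 % m : Nat) : Int)]) :
    Sh (writeArg n m a arg) n m ∧
    ∀ p q, p < n → q < m →
      cellAt (writeArg n m a arg) p q = if hitArg arg p q = true then 1 else cellAt a p q := by
  subst harg
  have hdiv : a0 / m < n := Nat.div_lt_of_lt_mul (Nat.mul_comm n m ▸ ha0)
  have hmod : a0 % m < m := Nat.mod_lt _ hm
  have hg0 : PySem.List.pyGetD [((a0 / m : Nat) : Int), ((a0 % m : Nat) : Int)] 0 0 = ((a0 / m : Nat) : Int) := by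
    simp [PySem.List.pyGetD]
  have hg1 : PySem.List.pyGetD [((a0 / m : Nat) : Int), ((a0 % m : Nat) : Int)] 1 0 = ((a0 % m : Nat) : Int) := by
    simp [PySem.List.pyGetD]
  unfold writeArg
  simp only [hg0, hg1, PySem.List.pyRange_zero_natCast, List.foldl_map]
  obtain ⟨hsh1, hcell1⟩ := fold_row n m ((a0 / m : Nat) : Int) (by positivity) (by simpa using hdiv)
    (List.range m) a hs (by simp)
  obtain ⟨hsh2, hcell2⟩ := fold_col n m ((a0 % m : Nat) : Int) (by positivity) (by simpa using hmod)
    (List.range n) _ hsh1 (by simp)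
  refine ⟨hsh2, ?_⟩
  intro p q hp hq
  rw [hcell2 p q hp hq, hcell1 p q hp hq]
  simp only [Int.toNat_natCast, List.mem_range, hitArg, List.getD_cons_zero,
    List.getD_cons_succ, Bool.or_eq_true, beq_iff_eq, Nat.cast_inj]
  by_cases h2 : q = a0 % m
  · rw [if_pos ⟨hp, h2⟩, if_pos (Or.inr h2.symm)]
  · rw [if_neg (by tauto)]
    by_cases h1 : p = a0 / m
    · rw [if_pos ⟨h1, hq⟩, if_pos (Or.inl h1.symm)]
    · rw [if_neg (by tauto), if_neg (by tauto)]

theorem fold_args (n m : Nat) (hm : 0 < m) :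
    ∀ (args : List (List Int)),
    (∀ arg ∈ args, ∃ a0 : Nat, a0 < n * m ∧
      arg = [((a0 / m : Nat) : Int), ((a0 % m : Nat) : Int)]) →
    ∀ a, Sh a n m →
      Sh (args.foldl (writeArg n m) a) n m ∧
      ∀ p q, p < n → q < m →
        cellAt (args.foldl (writeArg n m) a) p q =
          if ∃ arg ∈ args, hitArg arg p q = true then 1 else cellAt a p q := by
  intro args
  induction args with
  | nil => intro _ a hs; exact ⟨hs, by simp⟩
  | cons arg t ih =>
    intro h a hs
    obtain ⟨a0, ha0, harg⟩ := h arg List.mem_cons_self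
    obtain ⟨hsh1, hcell1⟩ := writeArg_cell n m hm a hs arg a0 ha0 harg
    obtain ⟨hsh, hcell⟩ := ih (fun x hx => h x (List.mem_cons_of_mem _ hx)) (writeArg n m a arg) hsh1
    refine ⟨by simpa [List.foldl_cons] using hsh, ?_⟩
    intro p q hp hq
    rw [List.foldl_cons, hcell p q hp hq, hcell1 p q hp hq]
    by_cases h1 : ∃ x ∈ t, hitArg x p q = true
    · rw [if_pos h1]
      obtain ⟨x, hx, hhit⟩ := h1
      rw [if_pos ⟨x, List.mem_cons_of_mem _ hx, hhit⟩]
    · rw [if_neg h1]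
      by_cases h2 : hitArg arg p q = true
      · rw [if_pos h2, if_pos ⟨arg, List.mem_cons_self, h2⟩]
      · rw [if_neg h2, if_neg (by
          rintro ⟨x, hx, hhit⟩
          rcases List.mem_cons.1 hx with rfl | hx
          · exact h2 hhit
          · exact h1 ⟨x, hx, hhit⟩)]

theorem mem_fold_add {beta : Type} (P : beta → Bool) (f : beta → Int) :
    ∀ (L : List beta) (s : PySem.Set Int) (x : Int),
      (x ∈ L.foldl (fun s p => if P p then PySem.Set.add s (f p) else s) s) ↔
        x ∈ s ∨ ∃ p ∈ L, P p = true ∧ x = f p := by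
  intro L
  induction L with
  | nil => simp
  | cons b t ih =>
    intro s x
    rw [List.foldl_cons]
    by_cases hb : P b
    · rw [if_pos hb, ih, PySem.Set.mem_add]
      constructor
      · rintro ((h | h) | h)
        · exact Or.inl h
        · exact Or.inr ⟨b, List.mem_cons_self, hb, h⟩
        · obtain ⟨p, hp, hP, hx⟩ := h
          exact Or.inr ⟨p, List.mem_cons_of_mem _ hp, hP, hx⟩
      · rintro (h | ⟨p, hp, hP, hx⟩)
        · exact Or.inl (Or.inl h)
        · rcases List.mem_cons.1 hp with rfl | hp
          · exact Or.inl (Or.inr hx)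
          · exact Or.inr ⟨p, hp, hP, hx⟩
    · rw [if_neg hb, ih]
      constructor
      · rintro (h | ⟨p, hp, hP, hx⟩)
        · exact Or.inl h
        · exact Or.inr ⟨p, List.mem_cons_of_mem _ hp, hP, hx⟩
      · rintro (h | ⟨p, hp, hP, hx⟩)
        · exact Or.inl h
        · rcases List.mem_cons.1 hp with rfl | hp
          · exact absurd hP (by simpa using hb)
          · exact Or.inr ⟨p, hp, hP, hx⟩

theorem mem_altRowSet (arr : List (List Int)) (x : Int) :
    x ∈ altRowSet arr ↔ ∃ k : Nat, ∃ h : k < arr.length, x = (k : Int) ∧ arr[k].contains 1 = true := by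
  unfold altRowSet
  have h0 := mem_fold_add (fun p : Int × List Int => p.2.contains 1) (fun p => p.1)
    (PySem.List.enumerate arr 0) PySem.Set.empty x
  rw [h0]
  simp only [PySem.Set.empty, List.not_mem_nil, false_or, PySem.List.mem_enumerate_iff]
  constructor
  · rintro ⟨p, ⟨k, hk, rfl⟩, hP, rfl⟩
    exact ⟨k, hk, by simp, hP⟩
  · rintro ⟨k, hk, rfl, hc⟩
    exact ⟨((k : Int), arr[k]), ⟨k, hk, by simp⟩, hc, rfl⟩

theorem mem_altColSet (arr : List (List Int)) (x : Int) :
    x ∈ altColSet arr ↔ ∃ r ∈ arr, ∃ q : Nat, ∃ h : q < r.length, x = (q : Int) ∧ r[q] = 1 := by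
  unfold altColSet
  have main : ∀ (L : List (List Int)) (s : PySem.Set Int),
      (x ∈ L.foldl (fun s r =>
        (PySem.List.enumerate r 0).foldl
          (fun s q => if q.2 = 1 then PySem.Set.add s q.1 else s) s) s) ↔
      x ∈ s ∨ ∃ r ∈ L, ∃ q : Nat, ∃ h : q < r.length, x = (q : Int) ∧ r[q] = 1 := by
    intro L
    induction L with
    | nil => simp
    | cons r t ih =>
      intro s
      rw [List.foldl_cons, ih]
      have inner := mem_fold_add (fun q : Int × Int => decide (q.2 = 1)) (fun q => q.1)
        (PySem.List.enumerate r 0) s x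
      rw [show (fun (s : PySem.Set Int) (q : Int × Int) => if q.2 = 1 then PySem.Set.add s q.1 else s) =
        (fun s q => if decide (q.2 = 1) = true then PySem.Set.add s q.1 else s) by
          funext s q; by_cases h : q.2 = 1 <;> simp [h], inner]
      simp only [PySem.List.mem_enumerate_iff, decide_eq_true_eq]
      constructor
      · rintro ((h | ⟨p, ⟨k, hk, rfl⟩, hv, rfl⟩) | ⟨r', hr', q, hq, rfl, hval⟩)
        · exact Or.inl h
        · exact Or.inr ⟨r, List.mem_cons_self, k, hk, by simp, by simpa using hv⟩
        · exact Or.inr ⟨r', List.mem_cons_of_mem _ hr', q, hq, rfl, hval⟩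
      · rintro (h | ⟨r', hr', q, hq, rfl, hval⟩)
        · exact Or.inl (Or.inl h)
        · rcases List.mem_cons.1 hr' with rfl | hr'
          · exact Or.inl (Or.inr ⟨((q:Int), r'[q]), ⟨q, hq, by simp⟩, hval, rfl⟩)
          · exact Or.inr ⟨r', hr', q, hq, rfl, hval⟩
  rw [main]
  simp [PySem.Set.empty]



theorem getD_zero_eq_headD {alpha : Type} (l : List alpha) (d : alpha) : l.getD 0 d = l.headD d := by
  cases l <;> rfl

theorem A_no1 (arr : List (List Int)) (h : (arr.all (fun r => !r.contains 1)) = true) :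
    ones_infection arr = arr := by
  have hno : (1:Int) ∉ arr.flatten := by
    rw [List.mem_flatten]
    rintro ⟨l, hl, h1⟩
    have h2 := List.all_eq_true.1 h l hl
    simp only [Bool.not_eq_eq_eq_not, Bool.not_true, List.contains_eq_mem, decide_eq_false_iff_not] at h2
    exact h2 h1
  have hcount : (arr.flatten).count 1 = 0 := List.count_eq_zero.2 hno
  have hgi : ∀ row : Int, getIndices arr.flatten 1 row = [] := by
    intro row; unfold getIndices; rw [hcount]; rfl
  simp only [ones_infection]
  rw [flat_foldl]
  simp only [List.nil_append, hgi, List.foldl_nil]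

theorem not_mem_altRowSet_no1 (arr : List (List Int))
    (h : (arr.all (fun r => !r.contains 1)) = true) (x : Int) : x ∉ altRowSet arr := by
  rw [mem_altRowSet]
  rintro ⟨k, hk, rfl, hc⟩
  have h2 := List.all_eq_true.1 h arr[k] (List.getElem_mem hk)
  simp only [Bool.not_eq_eq_eq_not, Bool.not_true] at h2
  rw [h2] at hc
  exact Bool.false_ne_true hc

theorem not_mem_altColSet_no1 (arr : List (List Int))
    (h : (arr.all (fun r => !r.contains 1)) = true) (x : Int) : x ∉ altColSet arr := by
  rw [mem_altColSet]
  rintro ⟨r, hr, q, hq, rfl, hval⟩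
  have h2 := List.all_eq_true.1 h r hr
  simp only [Bool.not_eq_eq_eq_not, Bool.not_true, List.contains_eq_mem, decide_eq_false_iff_not] at h2
  exact h2 (hval ▸ List.getElem_mem hq)

theorem B_no1 (arr : List (List Int)) (h : (arr.all (fun r => !r.contains 1)) = true) :
    ones_infection_alt arr = arr := by
  have hcr : ∀ x, PySem.Set.contains (altRowSet arr) x = false := fun x => by
    rw [← Bool.not_eq_true, PySem.Set.contains_iff]
    exact not_mem_altRowSet_no1 arr h x
  have hcc : ∀ x, PySem.Set.contains (altColSet arr) x = false := fun x => by
    rw [← Bool.not_eq_true, PySem.Set.contains_iff]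
    exact not_mem_altColSet_no1 arr h x
  simp only [ones_infection_alt, hcr, hcc, Bool.or_self, Bool.false_eq_true, if_false]
  rw [show (fun p : Int × List Int => (PySem.List.enumerate p.2 0).map (fun q => q.2)) =
      (fun p : Int × List Int => p.2) from funext fun p => PySem.List.map_snd_enumerate p.2 0]
  exact PySem.List.map_snd_enumerate arr 0

theorem getElem?_eq_some_getD {alpha : Type} (l : List alpha) (d : alpha) (q : Nat)
    (h : q < l.length) : l[q]? = some (l.getD q d) := by
  rw [List.getD_eq_getElem _ _ h, List.getElem?_eq_getElem]

theorem alt_getElem? (arr : List (List Int)) (p : Nat) :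
    (ones_infection_alt arr)[p]? = arr[p]?.map (fun r => (PySem.List.enumerate r 0).map (fun q =>
      if PySem.Set.contains (altRowSet arr) (p : Int) || PySem.Set.contains (altColSet arr) q.1
      then 1 else q.2)) := by
  simp only [ones_infection_alt]
  rw [List.getElem?_map, PySem.List.getElem?_enumerate]
  cases arr[p]? <;> simp

theorem main_rect (arr : List (List Int))
    (hrect : (arr.all (fun r => r.length == (arr.headD []).length)) = true)
    (hex : ¬ ((arr.all (fun r => !r.contains 1)) = true)) :
    ones_infection arr = ones_infection_alt arr := by
  set n := arr.length with hn
  set m := (arr.headD []).length with hmdef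
  have hrows : ∀ r ∈ arr, r.length = m := by
    intro r hr
    have := List.all_eq_true.1 hrect r hr
    simpa using this
  have hSh : Sh arr n m := ⟨rfl, hrows⟩
  -- some row contains a 1, hence m > 0
  have hex' : ∃ r ∈ arr, (1:Int) ∈ r := by
    by_contra hco
    exact hex (List.all_eq_true.2 fun r hr => by
      simp only [Bool.not_eq_eq_eq_not, Bool.not_true, List.contains_eq_mem,
        decide_eq_false_iff_not]
      exact fun h1 => hco ⟨r, hr, h1⟩)
  have hm : 0 < m := by
    obtain ⟨r, hr, h1⟩ := hex'
    have := hrows r hr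
    have : r ≠ [] := by rintro rfl; simp at h1
    have := List.length_pos_iff.2 this
    omega
  have hmlen : (PySem.List.pyGetD arr 0 []).length = m := by
    rw [show (0:Int) = ((0:Nat):Int) by rfl, PySem.List.pyGetD_of_nonneg _ _ (by omega)]
    rw [Int.toNat_natCast, getD_zero_eq_headD]
  -- A reduces to a fold of writeArg over getIndices of the flattened grid
  have hA : ones_infection arr = (getIndices arr.flatten 1 (m : Int)).foldl (writeArg n m) arr := by
    simp only [ones_infection]
    rw [flat_foldl, hmlen]
    simp only [List.nil_append]
    rfl
  -- membership characterisation of A's write list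
  have hmemiff : ∀ x, x ∈ getIndices arr.flatten 1 (m : Int) ↔
      ∃ a0 : Nat, arr.flatten[a0]? = some 1 ∧ x = [((a0 / m : Nat) : Int), ((a0 % m : Nat) : Int)] := by
    intro x
    unfold getIndices
    rw [go_mem (m : Int) (arr.flatten.count 1) arr.flatten [] x rfl]
    simp only [List.not_mem_nil, false_or]
    constructor
    · rintro ⟨a, ha, rfl⟩
      exact ⟨a, ha, by rw [PySem.Int.floordiv_natCast, PySem.Int.mod_natCast]⟩
    · rintro ⟨a, ha, rfl⟩
      exact ⟨a, ha, by rw [PySem.Int.floordiv_natCast, PySem.Int.mod_natCast]⟩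
  have hflatlen : arr.flatten.length = n * m := flat_len arr m hrows
  have hargs : ∀ arg ∈ getIndices arr.flatten 1 (m : Int), ∃ a0 : Nat, a0 < n * m ∧
      arg = [((a0 / m : Nat) : Int), ((a0 % m : Nat) : Int)] := by
    intro arg hmemb
    obtain ⟨a0, ha0, rfl⟩ := (hmemiff arg).1 hmemb
    exact ⟨a0, hflatlen ▸ (List.getElem?_eq_some_iff.1 ha0).1, rfl⟩
  obtain ⟨hShA, hcellA⟩ := fold_args n m hm (getIndices arr.flatten 1 (m : Int)) hargs arr hSh
  -- bridges between A's flattened positions and B's row/column conditions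
  have hrowiff : ∀ p, p < n → ((∃ a0 : Nat, arr.flatten[a0]? = some 1 ∧ a0 / m = p) ↔
      (arr.getD p []).contains 1 = true) := by
    intro p hp
    rw [List.contains_iff_mem]
    constructor
    · rintro ⟨a0, ha0, rfl⟩
      have hlt : a0 < n * m := hflatlen ▸ (List.getElem?_eq_some_iff.1 ha0).1
      have hmod : a0 % m < m := Nat.mod_lt _ hm
      have hdecomp : (a0 / m) * m + a0 % m = a0 := by
        rw [Nat.mul_comm]; exact Nat.div_add_mod a0 m
      have := flat_get arr m hrows (a0 / m) (a0 % m) (by omega) hmod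
      rw [hdecomp, ha0] at this
      have hcell : cellAt arr (a0 / m) (a0 % m) = 1 := by
        have := this.symm; simpa using this
      unfold cellAt at hcell
      rw [List.getD_eq_getElem _ _ (by rw [rowlen_getD arr n m hSh _ hp]; omega)] at hcell
      exact hcell ▸ List.getElem_mem _
    · intro h1
      obtain ⟨j, hj, hval⟩ := List.mem_iff_getElem.1 h1
      have hjm : j < m := (rowlen_getD arr n m hSh p hp) ▸ hj
      refine ⟨p * m + j, ?_, ?_⟩
      · rw [flat_get arr m hrows p j hp hjm]
        unfold cellAt
        rw [List.getD_eq_getElem _ _ hj, hval]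
      · rw [Nat.mul_comm p m, Nat.mul_add_div hm, Nat.div_eq_of_lt hjm]
        omega
  have hcoliff : ∀ q, q < m → ((∃ a0 : Nat, arr.flatten[a0]? = some 1 ∧ a0 % m = q) ↔
      (∃ i, i < n ∧ cellAt arr i q = 1)) := by
    intro q hq
    constructor
    · rintro ⟨a0, ha0, rfl⟩
      have hlt : a0 < n * m := hflatlen ▸ (List.getElem?_eq_some_iff.1 ha0).1
      have hdiv : a0 / m < n := Nat.div_lt_of_lt_mul (Nat.mul_comm n m ▸ hlt)
      have hdecomp : (a0 / m) * m + a0 % m = a0 := by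
        rw [Nat.mul_comm]; exact Nat.div_add_mod a0 m
      have := flat_get arr m hrows (a0 / m) (a0 % m) hdiv (Nat.mod_lt _ hm)
      rw [hdecomp, ha0] at this
      exact ⟨a0 / m, hdiv, by have := this.symm; simpa using this⟩
    · rintro ⟨i, hi, hcell⟩
      refine ⟨i * m + q, ?_, ?_⟩
      · rw [flat_get arr m hrows i q hi hq, hcell]
      · rw [Nat.mul_comm i m, Nat.mul_add_mod, Nat.mod_eq_of_lt hq]
  -- B's set memberships
  have hcontR : ∀ p, p < n → (PySem.Set.contains (altRowSet arr) (p : Int) = true ↔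
      (arr.getD p []).contains 1 = true) := by
    intro p hp
    rw [PySem.Set.contains_iff, mem_altRowSet]
    constructor
    · rintro ⟨k, hk, hpk, hc⟩
      have : p = k := by exact_mod_cast hpk
      subst this
      rwa [List.getD_eq_getElem _ _ (by omega)]
    · intro hc
      exact ⟨p, by omega, rfl, by rwa [List.getD_eq_getElem _ _ (by omega : p < arr.length)] at hc⟩
  have hcontC : ∀ q, q < m → (PySem.Set.contains (altColSet arr) (q : Int) = true ↔
      (∃ i, i < n ∧ cellAt arr i q = 1)) := by
    intro q hq
    rw [PySem.Set.contains_iff, mem_altColSet]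
    constructor
    · rintro ⟨r, hr, j, hj, hqj, hval⟩
      have hjq : q = j := by exact_mod_cast hqj
      subst hjq
      obtain ⟨i, hi, hri⟩ := List.mem_iff_getElem.1 hr
      refine ⟨i, by omega, ?_⟩
      unfold cellAt
      rw [List.getD_eq_getElem _ _ hi, hri, List.getD_eq_getElem _ _ hj, hval]
    · rintro ⟨i, hi, hcell⟩
      have hrl : (arr.getD i []).length = m := rowlen_getD arr n m hSh i hi
      refine ⟨arr.getD i [], ?_, q, by omega, rfl, ?_⟩
      · rw [List.getD_eq_getElem _ _ (by omega : i < arr.length)]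
        exact List.getElem_mem _
      · unfold cellAt at hcell
        rwa [List.getD_eq_getElem _ _ (by omega : q < (arr.getD i []).length)] at hcell
  -- the two write conditions coincide
  have hcond : ∀ p q, p < n → q < m →
      ((∃ arg ∈ getIndices arr.flatten 1 (m : Int), hitArg arg p q = true) ↔
       (PySem.Set.contains (altRowSet arr) (p : Int) = true ∨
        PySem.Set.contains (altColSet arr) (q : Int) = true)) := by
    intro p q hp hq
    rw [hcontR p hp, hcontC q hq, ← hrowiff p hp, ← hcoliff q hq]
    constructor
    · rintro ⟨arg, hmemb, hhit⟩
      obtain ⟨a0, ha0, rfl⟩ := (hmemiff arg).1 hmemb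
      simp only [hitArg, List.getD_cons_zero, List.getD_cons_succ, Bool.or_eq_true,
        beq_iff_eq, Nat.cast_inj] at hhit
      rcases hhit with h | h
      · exact Or.inl ⟨a0, ha0, h⟩
      · exact Or.inr ⟨a0, ha0, h⟩
    · rintro (⟨a0, ha0, hdiv⟩ | ⟨a0, ha0, hmod⟩)
      · refine ⟨[((a0 / m : Nat) : Int), ((a0 % m : Nat) : Int)], (hmemiff _).2 ⟨a0, ha0, rfl⟩, ?_⟩
        simp only [hitArg, List.getD_cons_zero, List.getD_cons_succ, Bool.or_eq_true,
          beq_iff_eq, Nat.cast_inj]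
        exact Or.inl hdiv
      · refine ⟨[((a0 / m : Nat) : Int), ((a0 % m : Nat) : Int)], (hmemiff _).2 ⟨a0, ha0, rfl⟩, ?_⟩
        simp only [hitArg, List.getD_cons_zero, List.getD_cons_succ, Bool.or_eq_true,
          beq_iff_eq, Nat.cast_inj]
        exact Or.inr hmod
  -- assemble, pointwise
  rw [hA]
  apply List.ext_getElem?
  intro p
  by_cases hp : p < n
  · rw [getElem?_eq_some_getD _ [] p (by rw [hShA.1]; omega), alt_getElem? arr p,
      getElem?_eq_some_getD arr [] p (by omega : p < arr.length), Option.map_some]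
    congr 1
    apply List.ext_getElem?
    intro q
    rw [List.getElem?_map, PySem.List.getElem?_enumerate]
    have hrlA : ((getIndices arr.flatten 1 (m : Int)).foldl (writeArg n m) arr |>.getD p []).length = m :=
      rowlen_getD _ n m hShA p hp
    have hrl : (arr.getD p []).length = m := rowlen_getD arr n m hSh p hp
    by_cases hq : q < m
    · rw [getElem?_eq_some_getD _ 0 q (by omega), getElem?_eq_some_getD _ 0 q (by omega)]
      simp only [Option.map_some, zero_add]
      have hcellA' := hcellA p q hp hq
      unfold cellAt at hcellA'
      rw [hcellA']
      by_cases hcnd : PySem.Set.contains (altRowSet arr) (p : Int) = true ∨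
          PySem.Set.contains (altColSet arr) (q : Int) = true
      · rw [if_pos ((hcond p q hp hq).2 hcnd)]
        rcases hcnd with h | h
        · rw [h, Bool.true_or]; simp
        · rw [h, Bool.or_true]; simp
      · rw [if_neg (fun hx => hcnd ((hcond p q hp hq).1 hx))]
        have hff : (PySem.Set.contains (altRowSet arr) (p : Int) ||
            PySem.Set.contains (altColSet arr) (q : Int)) = false := by
          cases hR : PySem.Set.contains (altRowSet arr) (p : Int) <;>
            cases hC : PySem.Set.contains (altColSet arr) (q : Int)
          · rfl
          · exact absurd (Or.inr hC) hcnd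
          · exact absurd (Or.inl hR) hcnd
          · exact absurd (Or.inl hR) hcnd
        rw [hff]
        simp
    · rw [List.getElem?_eq_none (by omega), List.getElem?_eq_none (by omega)]
      simp
  · rw [List.getElem?_eq_none (by rw [hShA.1]; omega),
      List.getElem?_eq_none (by
        simp only [ones_infection_alt, List.length_map, PySem.List.length_enumerate]
        omega)]

-- ===== VERDICT (by name: the statement is the Claim_ definition above) =====
theorem ones_infection_spec : Claim_equal_ones_infection := by
  intro arr _ hpre
  obtain ⟨_, hdisj⟩ := hpre
  unfold Spec_ones_infection
  by_cases hno : (arr.all (fun r => !r.contains 1)) = true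
  · rw [A_no1 arr hno, B_no1 arr hno]
  · rcases hdisj with hrect | hno'
    · exact main_rect arr hrect hno
    · exact absurd hno' hno
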